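-- pv_equiv track=rewrite | github.com/podlipensky/extract_authors | candidate.py | find_words_before
-- ===== SOURCE A (Python) =====
-- BEFORE = ['posted', 'by', 'author', 'and', '&', 'from']
--
-- def find_words_before(before):
--     dist = [-1 for i in BEFORE]
--     before_len = len(before)
--     for i in range(before_len):
--         word = before[i]
--         if word in BEFORE:
--             dist[BEFORE.index(word)] = before_len - i
--     return dist
-- ===== SOURCE B (Python) =====
-- BEFORE = ['posted', 'by', 'author', 'and', '&', 'from']
--
-- def find_words_before(before):
--     n = len(before)
--     result = []
--     for word in BEFORE:
--         if word in before:
--             last = n - 1 - before[::-1].index(word)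
--             result.append(n - last)
--         else:
--             result.append(-1)
--     return result
-- ===== Notes on version B (the rewrite author's own statement) =====
-- stated objective: alternative
-- what changed: B iterates over the six keywords and finds each keyword's last occurrence by one reverse search of `before`, instead of A's scan over every position of `before` with a repeated BEFORE.index lookup and in-place overwrites of the result list.
import Mathlib
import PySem

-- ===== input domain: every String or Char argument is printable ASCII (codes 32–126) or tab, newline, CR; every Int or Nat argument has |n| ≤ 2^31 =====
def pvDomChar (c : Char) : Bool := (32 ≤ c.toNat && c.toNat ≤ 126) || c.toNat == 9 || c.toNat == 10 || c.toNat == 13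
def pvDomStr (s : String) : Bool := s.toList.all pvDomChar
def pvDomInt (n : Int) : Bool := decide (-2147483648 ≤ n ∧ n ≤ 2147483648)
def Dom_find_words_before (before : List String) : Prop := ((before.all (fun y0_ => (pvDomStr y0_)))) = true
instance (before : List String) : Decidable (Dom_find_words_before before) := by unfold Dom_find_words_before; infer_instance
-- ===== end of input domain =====

-- B iterates over the six keywords, locating each one's last occurrence by a single
-- reverse search of `before`, instead of A's forward scan over all positions of
-- `before` with overwrites; same cost, different decomposition (objective: alternative).


-- module-level constant shared by both Pythons
def pvBEFORE : List String := ["posted", "by", "author", "and", "&", "from"]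

-- ===== PORT A =====
def find_words_before (before : List String) : List Int :=
  let dist : List Int := pvBEFORE.map (fun _ => (-1 : Int))
  let before_len : Int := (before.length : Int)
  (PySem.List.pyRange 0 before_len 1).foldl
    (fun dist i =>
      let word := PySem.List.pyGetD before i ""
      if word ∈ pvBEFORE then
        dist.set ((PySem.List.index? pvBEFORE word).getD 0) (before_len - i)
      else dist) dist

-- ===== PORT B =====
def find_words_before_alt (before : List String) : List Int :=
  let n : Int := (before.length : Int)
  pvBEFORE.map (fun word =>
    match PySem.List.index? before.reverse word with
    | some k => n - (n - 1 - (k : Int))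
    | none => (-1 : Int))

-- ===== PRECONDITION & SPEC =====
def Spec_find_words_before (before : List String) (out : List Int) : Prop := out = find_words_before_alt before
instance (before : List String) (out : List Int) : Decidable (Spec_find_words_before before out) := by unfold Spec_find_words_before; infer_instance

-- ===== CLAIM (what is proved, stated in full; the proofs are below) =====
def Claim_equal_find_words_before : Prop := ∀ (before : List String), Dom_find_words_before before → Spec_find_words_before before (find_words_before before)

-- ===== LEMMAS AND PROOFS =====

-- A's loop body on an (index, word) pair
def pvStep (n : Int) (dist : List Int) (p : Int × String) : List Int :=
  if p.2 ∈ pvBEFORE then dist.set ((PySem.List.index? pvBEFORE p.2).getD 0) (n - p.1) else dist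

def pvGo (n : Int) (l : List (Int × String)) (dist : List Int) : List Int :=
  l.foldl (pvStep n) dist

theorem pvGo_length (n : Int) (l : List (Int × String)) (dist : List Int) :
    (pvGo n l dist).length = dist.length := by
  induction l generalizing dist with
  | nil => rfl
  | cons p l ih =>
    simp only [pvGo, List.foldl_cons] at *
    rw [ih]
    unfold pvStep
    split <;> simp

theorem find_words_before_eq_pvGo (before : List String) :
    find_words_before before =
      pvGo (before.length : Int) (PySem.List.enumerate before 0)
        (pvBEFORE.map (fun _ => (-1 : Int))) := by
  unfold find_words_before pvGo pvStep
  rw [PySem.List.enumerate_eq_map_pyRange (d := "")]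
  rw [List.foldl_map]
  simp only [PySem.List.len_eq]

theorem index?_pvBEFORE_self (j : Nat) (w : String) (h : pvBEFORE[j]? = some w) :
    PySem.List.index? pvBEFORE w = some j := by
  have hj : j < pvBEFORE.length := by
    by_contra hc
    simp [List.getElem?_eq_none (by omega : pvBEFORE.length ≤ j)] at h
  simp only [pvBEFORE, List.length_cons, List.length_nil] at hj
  interval_cases j <;> (simp [pvBEFORE] at h; subst h; decide)

theorem pvStep_getElem?_ne (n : Int) (dist : List Int) (i : Int) (x : String)
    (j : Nat) (w : String) (h : pvBEFORE[j]? = some w) (hx : x ≠ w) :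
    (pvStep n dist (i, x))[j]? = dist[j]? := by
  unfold pvStep
  split
  · rename_i hmem
    obtain ⟨k, hk⟩ := Option.isSome_iff_exists.mp ((PySem.List.index?_isSome_iff _ _).mpr hmem)
    obtain ⟨hklt, hkval, -⟩ := PySem.List.getElem_of_index?_eq_some hk
    rw [hk]
    simp only [Option.getD_some]
    have hjk : k ≠ j := by
      intro hkj; subst hkj
      rw [List.getElem?_eq_getElem hklt] at h
      exact hx (hkval.symm.trans (Option.some.inj h))
    exact List.getElem?_set_ne hjk
  · rfl

theorem pvGo_getElem? (before : List String) (n : Int) (dist : List Int)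
    (h6 : dist.length = 6) (j : Nat) (w : String) (hw : pvBEFORE[j]? = some w) :
    (pvGo n (PySem.List.enumerate before 0) dist)[j]? =
      match PySem.List.index? before.reverse w with
      | some k => some (n - ((before.length : Int) - 1 - (k : Int)))
      | none => dist[j]? := by
  have hj : j < 6 := by
    by_contra hc
    have : pvBEFORE.length ≤ j := by simp [pvBEFORE]; omega
    simp [List.getElem?_eq_none this] at hw
  induction before using List.reverseRecOn with
  | nil =>
    simp [pvGo, PySem.List.enumerate, PySem.List.index?_eq_idxOf?]
  | append_singleton l x ih =>
    rw [PySem.List.enumerate_append]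
    simp only [pvGo, List.foldl_append]
    rw [List.reverse_append, List.reverse_singleton, List.singleton_append]
    by_cases hx : x = w
    · subst hx
      rw [PySem.List.index?_cons_self]
      have hmem : x ∈ pvBEFORE := by
        exact List.mem_of_getElem? hw
      have hidx := index?_pvBEFORE_self j x hw
      show (pvStep n (pvGo n (PySem.List.enumerate l 0) dist) (0 + (l.length : Int), x))[j]? = _
      unfold pvStep
      simp only [hmem, if_pos, hidx, Option.getD_some]
      rw [List.getElem?_set_self (by rw [pvGo_length]; omega)]
      congr 2
      push_cast [List.length_append, List.length_singleton]
      ring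
    · show (pvStep n (pvGo n (PySem.List.enumerate l 0) dist) (0 + (l.length : Int), x))[j]? = _
      rw [pvStep_getElem?_ne n _ _ x j w hw hx]
      rw [ih]
      rw [PySem.List.index?_cons_of_ne _ (fun h => hx h)]
      cases hk : PySem.List.index? l.reverse w with
      | none => simp
      | some k =>
        simp only [Option.map_some]
        congr 2
        push_cast [List.length_append, List.length_singleton]
        ring

theorem find_words_before_total_eq (before : List String) :
    find_words_before before = find_words_before_alt before := by
  apply List.ext_getElem?
  intro j
  by_cases hj : j < 6
  · have hw : ∃ w, pvBEFORE[j]? = some w := by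
      refine ⟨pvBEFORE[j]'(by simp [pvBEFORE]; omega), ?_⟩
      exact List.getElem?_eq_getElem _
    obtain ⟨w, hw⟩ := hw
    rw [find_words_before_eq_pvGo,
        pvGo_getElem? before _ _ (by simp [pvBEFORE]) j w hw]
    cases hk : PySem.List.index? before.reverse w with
    | none =>
      simp only [PySem.List.index?_eq_idxOf?] at hk
      simp only [find_words_before_alt, List.getElem?_map, hw, Option.map_some]
      rw [PySem.List.index?_eq_idxOf?, hk]
    | some k =>
      simp only [PySem.List.index?_eq_idxOf?] at hk
      simp only [find_words_before_alt, List.getElem?_map, hw, Option.map_some]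
      rw [PySem.List.index?_eq_idxOf?, hk]
  · have h1 : (find_words_before before).length = 6 := by
      rw [find_words_before_eq_pvGo, pvGo_length]
      simp [pvBEFORE]
    have h2 : (find_words_before_alt before).length = 6 := by
      unfold find_words_before_alt
      simp [pvBEFORE]
    rw [List.getElem?_eq_none (by omega), List.getElem?_eq_none (by omega)]

-- ===== VERDICT (by name: the statement is the Claim_ definition above) =====
theorem find_words_before_spec : Claim_equal_find_words_before := by
  intro before _
  exact find_words_before_total_eq before
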